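-- pv_equiv track=rewrite | github.com/FHArchive/StegStash | stegstash/zerowidth.py | getUtf8Size
-- ===== SOURCE A (Python) =====
-- def getUtf8Size(byteStream, pointer):
-- 	""" get the size of the next utf8 char """
-- 	byte = byteStream[pointer]
-- 	if byte < 128:
-- 		return 1, pointer
-- 	if byte & 0b11110000 == 0b11110000:
-- 		return 4, pointer
-- 	if byte & 0b11100000 == 0b11100000:
-- 		return 3, pointer
-- 	if byte & 0b11000000 == 0b11000000:
-- 		return 2, pointer
-- 	if byte & 0b10000000 == 0b10000000:
-- 		return getUtf8Size(byteStream, pointer - 1) # backtrack as we are reading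
-- 		# in the middle of a stream
-- 	return -1, -1 # error state
-- ===== SOURCE B (Python) =====
-- def _isContinuation(byte):
-- 	""" true for a UTF-8 continuation byte (the case where A backtracks) """
-- 	return (byte >= 128 and byte & 0b10000000 == 0b10000000
-- 		and all(byte & mask != mask for mask in (0b11110000, 0b11100000, 0b11000000)))
--
-- _LEAD_MASKS = ((4, 0b11110000), (3, 0b11100000), (2, 0b11000000))
--
-- def getUtf8Size(byteStream, pointer):
-- 	""" get the size of the next utf8 char """
-- 	# phase 1: walk back to the lead byte with an explicit loop
-- 	while _isContinuation(byteStream[pointer]):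
-- 		pointer -= 1
-- 	# phase 2: classify the lead byte via the mask table
-- 	byte = byteStream[pointer]
-- 	if byte < 128:
-- 		return 1, pointer
-- 	for size, mask in _LEAD_MASKS:
-- 		if byte & mask == mask:
-- 			return size, pointer
-- 	return -1, -1
-- ===== Notes on version B (the rewrite author's own statement) =====
-- stated objective: alternative
-- what changed: Replaces A's tail recursion with a two-phase decomposition: an explicit while loop that backtracks to the lead byte via a named continuation-byte predicate, then a single table-driven classification of the lead byte over the (size, mask) pairs.
import Mathlib
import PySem

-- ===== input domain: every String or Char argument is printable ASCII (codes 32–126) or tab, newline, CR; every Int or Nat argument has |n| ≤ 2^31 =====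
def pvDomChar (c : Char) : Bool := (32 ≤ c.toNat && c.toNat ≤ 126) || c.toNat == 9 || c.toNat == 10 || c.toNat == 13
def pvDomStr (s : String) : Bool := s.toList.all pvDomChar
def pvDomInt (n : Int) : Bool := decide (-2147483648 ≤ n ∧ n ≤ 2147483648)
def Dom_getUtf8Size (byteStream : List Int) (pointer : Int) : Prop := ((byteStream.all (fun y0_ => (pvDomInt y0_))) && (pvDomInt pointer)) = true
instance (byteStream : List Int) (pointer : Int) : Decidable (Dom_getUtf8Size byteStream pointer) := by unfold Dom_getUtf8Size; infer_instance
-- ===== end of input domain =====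

-- B changes the decomposition only (recursion → explicit backtracking loop + one classification); equivalence is on return values, neither version mutates its arguments.

-- used by both ports' termination proofs
theorem pyGet?_some_bounds {α : Type} {xs : List α} {i : Int} {b : α}
    (h : PySem.List.pyGet? xs i = some b) : -(xs.length : Int) ≤ i ∧ i < xs.length := by
  by_contra hc
  have : PySem.List.pyGet? xs i = none := by
    rw [PySem.List.pyGet?_eq_none_iff]
    simp [PySem.Raise.InRange]
    omega
  simp [this] at h

-- ===== PORT A =====
-- literal transliteration of A; where Python raises IndexError (pyGet? = none, excluded by Pre_) the port returns (0, 0)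
def getUtf8Size (byteStream : List Int) (pointer : Int) : Int × Int :=
  match h : PySem.List.pyGet? byteStream pointer with
  | none => (0, 0)
  | some byte =>
    if byte < 128 then (1, pointer)
    else if PySem.Int.band byte 240 == 240 then (4, pointer)
    else if PySem.Int.band byte 224 == 224 then (3, pointer)
    else if PySem.Int.band byte 192 == 192 then (2, pointer)
    else if PySem.Int.band byte 128 == 128 then getUtf8Size byteStream (pointer - 1)
    else (-1, -1)
termination_by (pointer + byteStream.length + 1).toNat
decreasing_by
  have := pyGet?_some_bounds h
  omega

-- ===== PORT B =====
def isContinuation (byte : Int) : Bool :=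
  (128 ≤ byte) && (PySem.Int.band byte 128 == 128)
    && ([(240 : Int), 224, 192].all fun mask => !(PySem.Int.band byte mask == mask))

def leadMasks : List (Int × Int) := [(4, 240), (3, 224), (2, 192)]

-- the while loop of B: walk back to the lead byte; none = IndexError (excluded by Pre_)
def findLead (byteStream : List Int) (pointer : Int) : Option Int :=
  match h : PySem.List.pyGet? byteStream pointer with
  | none => none
  | some byte =>
    if isContinuation byte then findLead byteStream (pointer - 1) else some pointer
termination_by (pointer + byteStream.length + 1).toNat
decreasing_by
  have := pyGet?_some_bounds h
  omega

def getUtf8Size_alt (byteStream : List Int) (pointer : Int) : Int × Int :=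
  match findLead byteStream pointer with
  | none => (0, 0)
  | some p =>
    match PySem.List.pyGet? byteStream p with
    | none => (0, 0)
    | some byte =>
      if byte < 128 then (1, p)
      else
        match leadMasks.find? (fun sm => PySem.Int.band byte sm.2 == sm.2) with
        | some sm => (sm.1, p)
        | none => (-1, -1)

-- ===== PRECONDITION & SPEC =====
-- Pre_ excludes exactly the inputs where A raises IndexError: the initial index past the end,
-- or a backtrack that runs off the front without ever meeting a non-continuation byte.
def Pre_getUtf8Size (byteStream : List Int) (pointer : Int) : Prop :=
  pointer < byteStream.length ∧
    ∃ q ∈ PySem.List.pyRange (-(byteStream.length : Int)) (pointer + 1) 1,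
      isContinuation (PySem.List.pyGetD byteStream q 0) = false
instance (byteStream : List Int) (pointer : Int) : Decidable (Pre_getUtf8Size byteStream pointer) := by
  unfold Pre_getUtf8Size; infer_instance

def pvWitness_getUtf8Size : List Int × Int := ([65], 0)

def Spec_getUtf8Size (byteStream : List Int) (pointer : Int) (out : Int × Int) : Prop := out = getUtf8Size_alt byteStream pointer
instance (byteStream : List Int) (pointer : Int) (out : Int × Int) : Decidable (Spec_getUtf8Size byteStream pointer out) := by unfold Spec_getUtf8Size; infer_instance

-- ===== CLAIM (what is proved, stated in full; the proofs are below) =====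
def Claim_equal_getUtf8Size : Prop := ∀ (byteStream : List Int) (pointer : Int), Dom_getUtf8Size byteStream pointer → Pre_getUtf8Size byteStream pointer → Spec_getUtf8Size byteStream pointer (getUtf8Size byteStream pointer)

-- ===== LEMMAS AND PROOFS =====

-- unfolding lemmas for the loop of B
theorem findLead_none {byteStream : List Int} {pointer : Int}
    (h : PySem.List.pyGet? byteStream pointer = none) : findLead byteStream pointer = none := by
  rw [findLead]; split <;> simp_all

theorem findLead_stop {byteStream : List Int} {pointer : Int} {b : Int}
    (h : PySem.List.pyGet? byteStream pointer = some b) (hc : isContinuation b = false) :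
    findLead byteStream pointer = some pointer := by
  rw [findLead]; split <;> simp_all

theorem findLead_step {byteStream : List Int} {pointer : Int} {b : Int}
    (h : PySem.List.pyGet? byteStream pointer = some b) (hc : isContinuation b = true) :
    findLead byteStream pointer = findLead byteStream (pointer - 1) := by
  rw [findLead]; split <;> simp_all

-- the ports agree on every input (outside Pre_ both return the (0,0) fallback)
theorem getUtf8Size_eq_alt (byteStream : List Int) (pointer : Int) :
    getUtf8Size byteStream pointer = getUtf8Size_alt byteStream pointer := by
  fun_induction getUtf8Size byteStream pointer with
  | case1 p h => simp [getUtf8Size_alt, findLead_none h]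
  | case2 p b h h1 =>
      have hc : isContinuation b = false := by
        simp [isContinuation, show ¬(128 ≤ b) by omega]
      simp [getUtf8Size_alt, findLead_stop h hc, h, h1]
  | case3 p b h h1 h2 =>
      have hc : isContinuation b = false := by simp [isContinuation, h2]
      simp [getUtf8Size_alt, findLead_stop h hc, h, h1, h2, leadMasks]
  | case4 p b h h1 h2 h3 =>
      have hc : isContinuation b = false := by simp [isContinuation, h3]
      simp [getUtf8Size_alt, findLead_stop h hc, h, h1, h2, h3, leadMasks, List.find?]
  | case5 p b h h1 h2 h3 h4 =>
      have hc : isContinuation b = false := by simp [isContinuation, h4]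
      simp [getUtf8Size_alt, findLead_stop h hc, h, h1, h2, h3, h4, leadMasks, List.find?]
  | case6 p b h h1 h2 h3 h4 h5 ih =>
      have hc : isContinuation b = true := by
        simp [isContinuation, show (128 : Int) ≤ b by omega, h2, h3, h4, h5]
      rw [ih]
      simp only [getUtf8Size_alt, findLead_step h hc]
  | case7 p b h h1 h2 h3 h4 h5 =>
      have hc : isContinuation b = false := by simp [isContinuation, h5]
      simp [getUtf8Size_alt, findLead_stop h hc, h, h1, h2, h3, h4, leadMasks, List.find?]

-- ===== VERDICT (by name: the statement is the Claim_ definition above) =====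
theorem getUtf8Size_spec : Claim_equal_getUtf8Size := by
  intro byteStream pointer _ _
  unfold Spec_getUtf8Size
  exact getUtf8Size_eq_alt byteStream pointer
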